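-- pv_equiv track=rewrite | github.com/JaredBears/LeetCode | Python-Solutions/LongestPalindromeByConcatenating.py | longestPalindromeNaive
-- ===== SOURCE A (Python) =====
-- from typing import List
--
-- def longestPalindromeNaive(words: List[str]) -> int:
--     palindromeLength = 0
--     single = False #keeps track of if there's a single palindrome in the list
--     while words: # O(n)
--         curr = words.pop()
--         reverse = curr[::-1]  # all words are same length, so constant O(2)
--         if reverse in words: #slow! nested O(n)
--             palindromeLength += 4
--             words.remove(reverse) #slow! double nested O(n)
--         elif curr == reverse and not single:
--             palindromeLength += 2
--             single = True
--     return palindromeLength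
-- ===== SOURCE B (Python) =====
-- def longestPalindromeNaive(words):
--     # One pass with a multiset of still-unpaired words: pair each word with a
--     # previously seen unpaired reverse; a leftover palindrome adds 2 once.
--     # NOTE: unlike the original, this does not empty `words` in place.
--     counts = {}
--     total = 0
--     for w in words:
--         r = w[::-1]
--         if counts.get(r, 0) > 0:
--             counts[r] = counts[r] - 1
--             total += 4
--         else:
--             counts[w] = counts.get(w, 0) + 1
--     if any(c > 0 and w == w[::-1] for w, c in counts.items()):
--         total += 2
--     return total
-- ===== Notes on version B (the rewrite author's own statement) =====
-- stated objective: faster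
-- what changed: Replaces the destructive pop/membership/remove loop (quadratic nested scans) by a single pass that keeps a hash map of still-unpaired word counts, pairing each word with a previously seen unpaired reverse, plus one final scan for a leftover palindrome.
import Mathlib
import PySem

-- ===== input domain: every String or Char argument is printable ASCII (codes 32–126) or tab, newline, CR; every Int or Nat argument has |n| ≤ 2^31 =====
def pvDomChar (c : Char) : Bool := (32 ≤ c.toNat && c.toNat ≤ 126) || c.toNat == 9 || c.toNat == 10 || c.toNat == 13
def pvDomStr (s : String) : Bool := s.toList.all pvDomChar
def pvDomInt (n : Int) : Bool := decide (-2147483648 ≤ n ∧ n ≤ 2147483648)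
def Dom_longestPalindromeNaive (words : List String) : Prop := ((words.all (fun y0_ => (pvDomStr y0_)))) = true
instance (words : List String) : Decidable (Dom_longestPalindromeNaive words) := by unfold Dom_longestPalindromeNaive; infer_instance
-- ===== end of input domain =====

-- B replaces A's destructive pop/membership/remove loop (nested scans) by a single pass over the
-- list keeping a dict of still-unpaired word counts, plus one final scan for a leftover palindrome.
-- NOTE on side effects: Python A empties the argument list in place; B does not — the equivalence
-- proved here is about the RETURN value.

-- ===== PORT A =====
-- s[::-1]  (equals PySem.Str.slice? s none none (-1), by PySem.Str.slice?_none_none_neg_one)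
def pyRev (s : String) : String := String.ofList s.toList.reverse

-- the 'while words:' loop; state = (words, single, palindromeLength)
def lpLoop (words : List String) (single : Bool) (acc : Int) : Int :=
  match hp : PySem.List.pop? words with          -- curr = words.pop()
  | none => acc                                   -- loop exits when words is empty
  | some (curr, rest) =>
    let reverse := pyRev curr                     -- reverse = curr[::-1]
    if hm : reverse ∈ rest then                   -- if reverse in words:
      lpLoop ((PySem.List.remove? rest reverse).getD rest) single (acc + 4)  -- words.remove(reverse)
    else if curr = reverse ∧ single = false then  -- elif curr == reverse and not single:
      lpLoop rest true (acc + 2)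
    else
      lpLoop rest single acc
termination_by words.length
decreasing_by
  · have h1 : rest.length + 1 = words.length := PySem.List.length_of_pop?_eq_some words hp
    rw [PySem.List.remove?_eq_some_erase rest reverse hm, Option.getD_some]
    have h2 := List.length_erase_le (l := rest) (a := reverse)
    omega
  · have h1 : rest.length + 1 = words.length := PySem.List.length_of_pop?_eq_some words hp
    omega
  · have h1 : rest.length + 1 = words.length := PySem.List.length_of_pop?_eq_some words hp
    omega

def longestPalindromeNaive (words : List String) : Int :=
  lpLoop words false 0

-- ===== PORT B =====
-- one iteration of B's main loop; state = (counts, total)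
def lpStep (st : PySem.Dict String Int × Int) (w : String) : PySem.Dict String Int × Int :=
  let r := pyRev w                                        -- r = w[::-1]
  if 0 < st.1.getD r 0 then                               -- if counts.get(r, 0) > 0:
    (st.1.insert r (st.1.getD r 0 - 1), st.2 + 4)         --   counts[r] -= 1; total += 4
  else
    (st.1.insert w (st.1.getD w 0 + 1), st.2)             -- else: counts[w] = counts.get(w,0)+1

def longestPalindromeNaive_alt (words : List String) : Int :=
  let st := words.foldl lpStep (PySem.Dict.empty, 0)
  -- if any(c > 0 and w == w[::-1] for w, c in counts.items()): total += 2
  if st.1.items.any (fun p => decide (0 < p.2) && (p.1 == pyRev p.1)) then st.2 + 2 else st.2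

-- ===== PRECONDITION & SPEC =====
def Spec_longestPalindromeNaive (words : List String) (out : Int) : Prop := out = longestPalindromeNaive_alt words
instance (words : List String) (out : Int) : Decidable (Spec_longestPalindromeNaive words out) := by unfold Spec_longestPalindromeNaive; infer_instance

-- ===== CLAIM (what is proved, stated in full; the proofs are below) =====
def Claim_equal_longestPalindromeNaive : Prop := ∀ (words : List String), Dom_longestPalindromeNaive words → Spec_longestPalindromeNaive words (longestPalindromeNaive words)

-- ===== LEMMAS AND PROOFS =====

lemma pyRev_pyRev (s : String) : pyRev (pyRev s) = s := by
  simp [pyRev, String.toList_ofList, String.ofList_toList]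

-- per-word contribution to twice the number of paired words, read off a count function
def gCnt (c : String → Nat) (w : String) : Nat :=
  if pyRev w = w then 2 * (c w / 2) else min (c w) (c (pyRev w))

-- twice the number of pairs A forms, as a sum over a support set
def FSum (S : Finset String) (c : String → Nat) : Nat := ∑ w ∈ S, gCnt c w

-- 'some palindrome occurs an odd number of times'
def OPb (l : List String) : Bool := l.any (fun w => (pyRev w == w) && (l.count w % 2 == 1))

lemma gCnt_congr (c c' : String → Nat) (w : String)
    (h1 : c' w = c w) (h2 : c' (pyRev w) = c (pyRev w)) : gCnt c' w = gCnt c w := by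
  unfold gCnt; rw [h1, h2]

lemma gCnt_zero (c : String → Nat) (w : String) (h : c w = 0) : gCnt c w = 0 := by
  unfold gCnt; rw [h]; split <;> simp

lemma OPb_iff (l : List String) :
    OPb l = true ↔ ∃ w, pyRev w = w ∧ l.count w % 2 = 1 := by
  unfold OPb
  rw [List.any_eq_true]
  constructor
  · rintro ⟨w, _, hw⟩
    simp only [Bool.and_eq_true, beq_iff_eq] at hw
    exact ⟨w, hw.1, hw.2⟩
  · rintro ⟨w, hpal, hodd⟩
    have hmem : w ∈ l := by
      rw [← List.count_pos_iff]; omega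
    exact ⟨w, hmem, by simp [hpal, hodd]⟩

lemma OPb_congr (l l' : List String)
    (h : ∀ w, pyRev w = w → l.count w % 2 = l'.count w % 2) : OPb l = OPb l' := by
  rw [Bool.eq_iff_iff, OPb_iff, OPb_iff]
  constructor
  · rintro ⟨w, hpal, hodd⟩; exact ⟨w, hpal, by rw [← h w hpal]; exact hodd⟩
  · rintro ⟨w, hpal, hodd⟩; exact ⟨w, hpal, by rw [h w hpal]; exact hodd⟩

-- adding a word together with a fresh occurrence of its reverse raises FSum by 2
lemma FSum_pair (S : Finset String) (c : String → Nat) (x : String)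
    (hx : x ∈ S) (hrx : pyRev x ∈ S) :
    FSum S (fun w => c w + (if w = x then 1 else 0) + (if w = pyRev x then 1 else 0))
      = FSum S c + 2 := by
  set c' : String → Nat :=
    fun w => c w + (if w = x then 1 else 0) + (if w = pyRev x then 1 else 0) with hc'
  by_cases hpal : pyRev x = x
  · unfold FSum
    rw [← Finset.add_sum_erase S (gCnt c') hx, ← Finset.add_sum_erase S (gCnt c) hx]
    have hrest : ∑ w ∈ S.erase x, gCnt c' w = ∑ w ∈ S.erase x, gCnt c w := by
      refine Finset.sum_congr rfl (fun w hw => ?_)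
      have hwx : w ≠ x := Finset.ne_of_mem_erase hw
      refine gCnt_congr c c' w (by simp [hc', hwx, hpal]) ?_
      have hne : pyRev w ≠ x := by
        intro hcon
        have hwrx : w = pyRev x := by rw [← hcon, pyRev_pyRev]
        exact hwx (by rw [hwrx, hpal])
      simp [hc', hne, hpal]
    rw [hrest]
    have hcx : c' x = c x + 2 := by simp [hc', hpal]
    have hgx : gCnt c' x = gCnt c x + 2 := by
      unfold gCnt
      rw [if_pos hpal, if_pos hpal, hcx]
      omega
    omega
  · have hne : pyRev x ≠ x := hpal
    have hrx' : pyRev x ∈ S.erase x := Finset.mem_erase.mpr ⟨hne, hrx⟩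
    unfold FSum
    rw [← Finset.add_sum_erase S (gCnt c') hx, ← Finset.add_sum_erase S (gCnt c) hx,
        ← Finset.add_sum_erase _ (gCnt c') hrx', ← Finset.add_sum_erase _ (gCnt c) hrx']
    have hrest : ∑ w ∈ (S.erase x).erase (pyRev x), gCnt c' w
        = ∑ w ∈ (S.erase x).erase (pyRev x), gCnt c w := by
      refine Finset.sum_congr rfl (fun w hw => ?_)
      have hwr : w ≠ pyRev x := Finset.ne_of_mem_erase hw
      have hwx : w ≠ x := Finset.ne_of_mem_erase (Finset.mem_of_mem_erase hw)
      refine gCnt_congr c c' w (by simp [hc', hwx, hwr]) ?_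
      have h1 : pyRev w ≠ x := by
        intro hcon; exact hwr (by rw [← hcon, pyRev_pyRev])
      have h2 : pyRev w ≠ pyRev x := by
        intro hcon
        have := congrArg pyRev hcon
        rw [pyRev_pyRev, pyRev_pyRev] at this
        exact hwx this
      simp [hc', h1, h2]
    rw [hrest]
    have hxr : ¬ x = pyRev x := fun h => hne h.symm
    have hcx : c' x = c x + 1 := by
      simp [hc', hxr]
    have hcr : c' (pyRev x) = c (pyRev x) + 1 := by
      simp [hc', hne]
    have hgx : gCnt c' x = gCnt c x + 1 := by
      unfold gCnt
      rw [if_neg hpal, if_neg hpal, hcx, hcr]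
      omega
    have hgr : gCnt c' (pyRev x) = gCnt c (pyRev x) + 1 := by
      unfold gCnt
      have hpal' : ¬ pyRev (pyRev x) = pyRev x := by
        rw [pyRev_pyRev]; exact fun h => hne h.symm
      rw [if_neg hpal', if_neg hpal', pyRev_pyRev, hcx, hcr]
      omega
    omega

-- adding one word whose reverse is absent leaves FSum unchanged
lemma FSum_lone (S : Finset String) (c : String → Nat) (x : String)
    (h0 : c (pyRev x) = 0) :
    FSum S (fun w => c w + (if w = x then 1 else 0)) = FSum S c := by
  set c' : String → Nat := fun w => c w + (if w = x then 1 else 0) with hc'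
  refine Finset.sum_congr rfl (fun w _ => ?_)
  by_cases hw : w = x
  · subst hw
    by_cases hpal : pyRev w = w
    · have hw0 : c w = 0 := by rw [← hpal]; exact h0
      have h1 : c' w = 1 := by simp [hc', hw0]
      unfold gCnt
      rw [if_pos hpal, if_pos hpal, h1, hw0]
    · unfold gCnt
      rw [if_neg hpal, if_neg hpal]
      have h1 : c' (pyRev w) = 0 := by
        simp only [hc']
        rw [if_neg hpal, h0]
      rw [h1, h0]
      simp
  · by_cases hrw : pyRev w = x
    · have hwrx : w = pyRev x := by rw [← hrw, pyRev_pyRev]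
      have hpal : ¬ pyRev w = w := by
        rw [hrw]; exact fun hcon => hw hcon.symm
      have hw0 : c w = 0 := by rw [hwrx]; exact h0
      have hw0' : c' w = 0 := by simp [hc', hw, hw0]
      unfold gCnt
      rw [if_neg hpal, if_neg hpal, hw0, hw0']
      simp
    · exact gCnt_congr c c' w (by simp [hc', hw]) (by simp [hc', hrw])

lemma count_concat (t : List String) (x w : String) :
    (t ++ [x]).count w = t.count w + (if w = x then 1 else 0) := by
  rw [List.count_append]
  by_cases h : w = x
  · subst h
    simp
  · have h1 : List.count w [x] = 0 := List.count_eq_zero.mpr (by simp [h])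
    rw [h1, if_neg h]

lemma lpLoop_nil (s : Bool) (acc : Int) : lpLoop [] s acc = acc := by
  rw [lpLoop]
  split
  · rfl
  · rename_i curr rest hp
    have := PySem.List.length_of_pop?_eq_some [] hp
    simp at this

lemma lpLoop_concat (t : List String) (x : String) (s : Bool) (acc : Int) :
    lpLoop (t ++ [x]) s acc =
      if pyRev x ∈ t then lpLoop (t.erase (pyRev x)) s (acc + 4)
      else if x = pyRev x ∧ s = false then lpLoop t true (acc + 2)
      else lpLoop t s acc := by
  rw [lpLoop]
  split
  · rename_i hp
    rw [PySem.List.pop?_last] at hp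
    cases hp
  · rename_i curr rest hp
    rw [PySem.List.pop?_last] at hp
    injection hp with h
    injection h with h1 h2
    subst h1
    subst h2
    show (if hm : pyRev x ∈ t then lpLoop ((PySem.List.remove? t (pyRev x)).getD t) s (acc + 4)
          else if x = pyRev x ∧ s = false then lpLoop t true (acc + 2) else lpLoop t s acc) = _
    split_ifs with hm h2
    · rw [PySem.List.remove?_eq_some_erase t (pyRev x) hm, Option.getD_some]
    · rfl
    · rfl

-- the empty list contributes nothing
lemma FSum_nil (S : Finset String) :
    FSum S (fun w => List.count w ([] : List String)) = 0 :=
  Finset.sum_eq_zero (fun w _ => gCnt_zero _ w (by simp))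

-- characterisation of A's loop: acc + (2 × pair contributions) + single-palindrome bonus
lemma lpLoop_formula (S : Finset String) :
    ∀ (n : Nat) (l : List String), l.length ≤ n →
      (∀ w, l.count w ≠ 0 → w ∈ S) →
      ∀ (s : Bool) (acc : Int),
        lpLoop l s acc = acc + 2 * (FSum S (fun w => l.count w) : Int)
          + (if s then 0 else if OPb l then 2 else 0) := by
  intro n
  induction n with
  | zero =>
    intro l hl _ s acc
    have : l = [] := List.length_eq_zero_iff.mp (Nat.le_zero.mp hl)
    subst this
    rw [lpLoop_nil, FSum_nil]
    simp [OPb]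
  | succ n ih =>
    intro l hl hsupp s acc
    rcases List.eq_nil_or_concat l with rfl | ⟨t, x, rfl⟩
    · rw [lpLoop_nil, FSum_nil]
      simp [OPb]
    · rw [List.concat_eq_append] at *
      have hlen : t.length ≤ n := by
        simp only [List.length_append, List.length_singleton] at hl
        omega
      have hxS : x ∈ S := hsupp x (by rw [count_concat]; simp)
      rw [lpLoop_concat]
      by_cases h1 : pyRev x ∈ t
      · rw [if_pos h1]
        have hrxS : pyRev x ∈ S := hsupp (pyRev x) (by
          have : 0 < t.count (pyRev x) := List.count_pos_iff.mpr h1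
          rw [count_concat]; omega)
        set t' := t.erase (pyRev x) with ht'
        have hcnt : ∀ w, (t ++ [x]).count w
            = t'.count w + (if w = x then 1 else 0) + (if w = pyRev x then 1 else 0) := by
          intro w
          rw [count_concat]
          by_cases hwr : w = pyRev x
          · subst hwr
            have hce := List.count_erase_self (a := pyRev x) (l := t)
            have hpos : 0 < t.count (pyRev x) := List.count_pos_iff.mpr h1
            rw [if_pos rfl, ht', hce]
            omega
          · have hce := List.count_erase_of_ne hwr (l := t)
            rw [if_neg hwr, ht', hce]
            omega
        have hsupp' : ∀ w, t'.count w ≠ 0 → w ∈ S := by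
          intro w hw
          apply hsupp w
          have := hcnt w
          omega
        have hlen' : t'.length ≤ n := le_trans List.length_erase_le hlen
        rw [ih t' hlen' hsupp' s (acc + 4)]
        have hF : FSum S (fun w => (t ++ [x]).count w) = FSum S (fun w => t'.count w) + 2 := by
          have hp := FSum_pair S (fun w => t'.count w) x hxS hrxS
          rw [← hp]
          exact congrArg (FSum S) (funext hcnt)
        have hOP : OPb (t ++ [x]) = OPb t' := by
          apply OPb_congr
          intro w hpal
          have hc := hcnt w
          by_cases hpx : pyRev x = x
          · rw [hpx] at hc
            by_cases hwx : w = x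
            · subst hwx
              rw [if_pos rfl] at hc
              omega
            · rw [if_neg hwx] at hc
              omega
          · have hwx : w ≠ x := fun hcon => hpx (hcon ▸ hpal)
            have hwr : w ≠ pyRev x := by
              intro hcon
              have h' : pyRev w = x := by rw [hcon, pyRev_pyRev]
              have hwx' : w = x := by rw [← hpal, h']
              exact hpx (by rw [← hcon, hwx'])
            rw [if_neg hwx, if_neg hwr] at hc
            omega
        rw [hF, hOP]
        push_cast
        ring
      · rw [if_neg h1]
        have h1c : t.count (pyRev x) = 0 := by
          rw [List.count_eq_zero]; exact h1
        have hcnt : ∀ w, (t ++ [x]).count w = t.count w + (if w = x then 1 else 0) :=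
          fun w => count_concat t x w
        have hsupp' : ∀ w, t.count w ≠ 0 → w ∈ S := by
          intro w hw
          apply hsupp w
          have := hcnt w
          omega
        have hF : FSum S (fun w => (t ++ [x]).count w) = FSum S (fun w => t.count w) := by
          rw [congrArg (FSum S) (funext hcnt)]
          exact FSum_lone S (fun w => t.count w) x h1c
        by_cases h2 : x = pyRev x ∧ s = false
        · rw [if_pos h2]
          rw [ih t hlen hsupp' true (acc + 2)]
          have hOP : OPb (t ++ [x]) = true := by
            rw [OPb_iff]
            refine ⟨x, h2.1.symm, ?_⟩
            have hx0 : t.count x = 0 := by rw [← h2.1] at h1c; exact h1c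
            rw [count_concat, hx0, if_pos rfl]
          rw [hF, h2.2, hOP]
          simp only [if_pos trivial]
          push_cast
          ring
        · rw [if_neg h2]
          rw [ih t hlen hsupp' s acc, hF]
          cases s with
          | true => simp
          | false =>
            have hxnp : x ≠ pyRev x := fun hcon => h2 ⟨hcon, rfl⟩
            have hOP : OPb (t ++ [x]) = OPb t := by
              apply OPb_congr
              intro w hpal
              have hc := hcnt w
              have hwx : w ≠ x := by
                intro hcon; subst hcon; exact hxnp hpal.symm
              rw [if_neg hwx] at hc
              omega
            rw [hOP]

-- A's value in closed form
lemma A_val (l : List String) :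
    longestPalindromeNaive l
      = 2 * (FSum l.toFinset (fun w => l.count w) : Int) + (if OPb l then 2 else 0) := by
  unfold longestPalindromeNaive
  rw [lpLoop_formula l.toFinset l.length l (le_refl _)
        (fun w hw => List.mem_toFinset.mpr (List.count_pos_iff.mp (by omega))) false 0]
  simp

-- leftover counts form no pair: FSum over them is 0
lemma FSum_leftover (S : Finset String) (d : PySem.Dict String Int)
    (hpal : ∀ w, pyRev w = w → d.getD w 0 ≤ 1)
    (hnp : ∀ w, pyRev w ≠ w → d.getD w 0 = 0 ∨ d.getD (pyRev w) 0 = 0) :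
    FSum S (fun w => (d.getD w 0).toNat) = 0 := by
  refine Finset.sum_eq_zero (fun w _ => ?_)
  have hb : gCnt (fun v => (d.getD v 0).toNat) w
      = if pyRev w = w then 2 * ((d.getD w 0).toNat / 2)
        else min (d.getD w 0).toNat (d.getD (pyRev w) 0).toNat := rfl
  rw [hb]
  by_cases h : pyRev w = w
  · rw [if_pos h]
    have := hpal w h
    omega
  · rw [if_neg h]
    rcases hnp w h with h0 | h0 <;> rw [h0] <;> simp

-- counting in a cons, with a propositional if
lemma count_cons' (w v : String) (l : List String) :
    (w :: l).count v = l.count v + (if v = w then 1 else 0) := by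
  rw [List.count_cons]
  by_cases h : v = w
  · rw [if_pos h, if_pos (show (w == v) = true by simp [h])]
  · rw [if_neg h, if_neg (show ¬ (w == v) = true by simp; exact fun hh => h hh.symm)]

-- B's loop invariant
lemma B_loop (S : Finset String) :
    ∀ (rest : List String) (d : PySem.Dict String Int) (total : Int),
      (∀ w, 0 ≤ d.getD w 0) →
      (∀ w, pyRev w = w → d.getD w 0 ≤ 1) →
      (∀ w, pyRev w ≠ w → d.getD w 0 = 0 ∨ d.getD (pyRev w) 0 = 0) →
      d.keys.Nodup →
      (∀ w, (d.getD w 0).toNat + rest.count w ≠ 0 → w ∈ S) →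
      (∀ w, 0 ≤ (rest.foldl lpStep (d, total)).1.getD w 0) ∧
      (∀ w, pyRev w = w → (rest.foldl lpStep (d, total)).1.getD w 0 ≤ 1) ∧
      (∀ w, pyRev w ≠ w → (rest.foldl lpStep (d, total)).1.getD w 0 = 0 ∨
          (rest.foldl lpStep (d, total)).1.getD (pyRev w) 0 = 0) ∧
      (rest.foldl lpStep (d, total)).1.keys.Nodup ∧
      (∀ w, pyRev w = w →
        ((rest.foldl lpStep (d, total)).1.getD w 0).toNat % 2
          = ((d.getD w 0).toNat + rest.count w) % 2) ∧
      (rest.foldl lpStep (d, total)).2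
          + 2 * (FSum S (fun w => ((rest.foldl lpStep (d, total)).1.getD w 0).toNat) : Int)
        = total + 2 * (FSum S (fun w => (d.getD w 0).toNat + rest.count w) : Int) := by
  intro rest
  induction rest with
  | nil =>
    intro d total hnn hp1 hnp hnd _
    refine ⟨hnn, hp1, hnp, hnd, fun w _ => by simp, ?_⟩
    simp
  | cons w rest' ih =>
    intro d total hnn hp1 hnp hnd hsupp
    rw [List.foldl_cons]
    by_cases hpos : 0 < d.getD (pyRev w) 0
    · have hstep : lpStep (d, total) w
          = (d.insert (pyRev w) (d.getD (pyRev w) 0 - 1), total + 4) := by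
        unfold lpStep
        rw [if_pos hpos]
      rw [hstep]
      have hget : ∀ v, (d.insert (pyRev w) (d.getD (pyRev w) 0 - 1)).getD v 0
          = if v = pyRev w then d.getD (pyRev w) 0 - 1 else d.getD v 0 := by
        intro v; rw [PySem.Dict.getD_insert]
      set d' := d.insert (pyRev w) (d.getD (pyRev w) 0 - 1) with hd'
      have hnn' : ∀ v, 0 ≤ d'.getD v 0 := by
        intro v; rw [hget]; split
        · omega
        · exact hnn v
      have hp1' : ∀ v, pyRev v = v → d'.getD v 0 ≤ 1 := by
        intro v hv; rw [hget]; split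
        · rename_i hvr; rw [← hvr]; have := hp1 v hv; omega
        · exact hp1 v hv
      have hnp' : ∀ v, pyRev v ≠ v → d'.getD v 0 = 0 ∨ d'.getD (pyRev v) 0 = 0 := by
        intro v hv
        rcases hnp v hv with h0 | h0
        · left; rw [hget]; split
          · rename_i hvr; rw [hvr] at h0; omega
          · exact h0
        · right; rw [hget]; split
          · rename_i hvr; rw [hvr] at h0; omega
          · exact h0
      have hnd' : d'.keys.Nodup := PySem.Dict.nodup_keys_insert d _ _ hnd
      have hcomb : ∀ v, (d.getD v 0).toNat + (w :: rest').count v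
          = ((d'.getD v 0).toNat + rest'.count v)
              + (if v = w then 1 else 0) + (if v = pyRev w then 1 else 0) := by
        intro v
        rw [hget, count_cons' w v rest']
        by_cases hvr : v = pyRev w
        · subst hvr
          rw [if_pos rfl, if_pos rfl]
          by_cases hvw : (pyRev w : String) = w
          · rw [if_pos hvw]; omega
          · rw [if_neg hvw]; omega
        · rw [if_neg hvr, if_neg hvr]
          by_cases hvw : v = w
          · rw [if_pos hvw]; omega
          · rw [if_neg hvw]; omega
      have hsupp' : ∀ v, (d'.getD v 0).toNat + rest'.count v ≠ 0 → v ∈ S := by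
        intro v hv
        apply hsupp v
        have := hcomb v
        omega
      obtain ⟨c1, c2, c3, c4, c5, c6⟩ := ih d' (total + 4) hnn' hp1' hnp' hnd' hsupp'
      refine ⟨c1, c2, c3, c4, ?_, ?_⟩
      · intro v hv
        rw [c5 v hv]
        have hc := hcomb v
        by_cases hvw : v = w
        · have hvr : v = pyRev w := by rw [← hvw]; exact hv.symm
          rw [if_pos hvw, if_pos hvr] at hc
          omega
        · have hvr : ¬ v = pyRev w := by
            intro hcon
            have h' : pyRev v = w := by rw [hcon, pyRev_pyRev]
            rw [hv] at h'
            exact hvw h'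
          rw [if_neg hvw, if_neg hvr] at hc
          omega
      · rw [c6]
        have hFS : FSum S (fun v => (d.getD v 0).toNat + (w :: rest').count v)
            = FSum S (fun v => (d'.getD v 0).toNat + rest'.count v) + 2 := by
          rw [congrArg (FSum S) (funext hcomb)]
          refine FSum_pair S _ w ?_ ?_
          · apply hsupp w
            rw [count_cons' w w rest', if_pos rfl]
            omega
          · apply hsupp (pyRev w)
            omega
        rw [hFS]
        push_cast
        ring
    · have h0 : d.getD (pyRev w) 0 = 0 := by
        have := hnn (pyRev w); omega
      have hstep : lpStep (d, total) w = (d.insert w (d.getD w 0 + 1), total) := by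
        unfold lpStep; rw [if_neg hpos]
      rw [hstep]
      have hget : ∀ v, (d.insert w (d.getD w 0 + 1)).getD v 0
          = if v = w then d.getD w 0 + 1 else d.getD v 0 := by
        intro v; rw [PySem.Dict.getD_insert]
      set d' := d.insert w (d.getD w 0 + 1) with hd'
      have hcomb : ∀ v, (d'.getD v 0).toNat + rest'.count v
          = (d.getD v 0).toNat + (w :: rest').count v := by
        intro v
        rw [hget, count_cons' w v rest']
        by_cases hvw : v = w
        · subst hvw; rw [if_pos rfl, if_pos rfl]; have := hnn v; omega
        · rw [if_neg hvw, if_neg hvw]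
          omega
      have hnn' : ∀ v, 0 ≤ d'.getD v 0 := by
        intro v; rw [hget]; split
        · have := hnn w; omega
        · exact hnn v
      have hp1' : ∀ v, pyRev v = v → d'.getD v 0 ≤ 1 := by
        intro v hv; rw [hget]; split
        · rename_i hvw
          rw [hvw] at hv
          rw [hv] at h0
          omega
        · exact hp1 v hv
      have hnp' : ∀ v, pyRev v ≠ v → d'.getD v 0 = 0 ∨ d'.getD (pyRev v) 0 = 0 := by
        intro v hv
        by_cases hvw : v = w
        · right
          rw [hget]
          have hne : ¬ pyRev v = w := by rw [hvw] at hv ⊢; exact hv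
          rw [if_neg hne, hvw]
          exact h0
        · by_cases hrvw : pyRev v = w
          · left
            rw [hget, if_neg hvw]
            have hvp : v = pyRev w := by rw [← hrvw, pyRev_pyRev]
            rw [hvp]; exact h0
          · rcases hnp v hv with ha | ha
            · left; rw [hget, if_neg hvw]; exact ha
            · right; rw [hget, if_neg hrvw]; exact ha
      have hnd' : d'.keys.Nodup := PySem.Dict.nodup_keys_insert d w _ hnd
      have hsupp' : ∀ v, (d'.getD v 0).toNat + rest'.count v ≠ 0 → v ∈ S := by
        intro v hv
        apply hsupp v
        rw [hcomb v] at hv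
        exact hv
      obtain ⟨c1, c2, c3, c4, c5, c6⟩ := ih d' total hnn' hp1' hnp' hnd' hsupp'
      refine ⟨c1, c2, c3, c4, ?_, ?_⟩
      · intro v hv
        rw [c5 v hv, hcomb v]
      · rw [c6, congrArg (FSum S) (funext hcomb)]

-- B's value in closed form
lemma B_val (l : List String) :
    longestPalindromeNaive_alt l
      = 2 * (FSum l.toFinset (fun w => l.count w) : Int) + (if OPb l then 2 else 0) := by
  have hrw : longestPalindromeNaive_alt l =
      (if ((l.foldl lpStep (PySem.Dict.empty, 0)).1.items.any
            fun p => decide (0 < p.2) && (p.1 == pyRev p.1))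
        then (l.foldl lpStep (PySem.Dict.empty, 0)).2 + 2
        else (l.foldl lpStep (PySem.Dict.empty, 0)).2) := rfl
  rw [hrw]
  obtain ⟨c1, c2, c3, c4, c5, c6⟩ := B_loop l.toFinset l PySem.Dict.empty 0
    (fun w => by simp [PySem.Dict.getD_empty])
    (fun w _ => by simp [PySem.Dict.getD_empty])
    (fun w _ => by left; simp [PySem.Dict.getD_empty])
    PySem.Dict.nodup_keys_empty
    (fun w hw => by
      simp only [PySem.Dict.getD_empty, Int.toNat_zero, Nat.zero_add] at hw
      exact List.mem_toFinset.mpr (List.count_pos_iff.mp (by omega)))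
  set res := l.foldl lpStep (PySem.Dict.empty, 0) with hres
  have hF0 : FSum l.toFinset (fun w => (res.1.getD w 0).toNat) = 0 :=
    FSum_leftover l.toFinset res.1 c2 c3
  have hcomb : (fun w => ((PySem.Dict.empty : PySem.Dict String Int).getD w 0).toNat + l.count w)
      = fun w => l.count w := by
    funext w
    rw [PySem.Dict.getD_empty]
    simp
  rw [hF0, hcomb] at c6
  simp only [Nat.cast_zero, mul_zero, add_zero, zero_add] at c6
  have hany : (res.1.items.any (fun p => decide (0 < p.2) && (p.1 == pyRev p.1)))
      = OPb l := by
    rw [Bool.eq_iff_iff, OPb_iff, List.any_eq_true]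
    constructor
    · rintro ⟨p, hmem, hp⟩
      simp only [Bool.and_eq_true, decide_eq_true_eq, beq_iff_eq] at hp
      obtain ⟨hposv, hpalv⟩ := hp
      have hpal' : pyRev p.1 = p.1 := hpalv.symm
      have hg : res.1.getD p.1 0 = p.2 := by
        have hm : (p.1, p.2) ∈ res.1.items := by
          cases p; exact hmem
        exact PySem.Dict.getD_of_mem_items res.1 hm c4 0
      refine ⟨p.1, hpal', ?_⟩
      have hle := c2 p.1 hpal'
      have hpar := c5 p.1 hpal'
      simp only [PySem.Dict.getD_empty, Int.toNat_zero, Nat.zero_add] at hpar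
      rw [hg] at hle hpar
      have hone : p.2 = 1 := by omega
      rw [hone] at hpar
      simpa using hpar.symm
    · rintro ⟨w, hpal, hodd⟩
      have hpar := c5 w hpal
      simp only [PySem.Dict.getD_empty, Int.toNat_zero, Nat.zero_add] at hpar
      rw [hodd] at hpar
      have hposv : 0 < res.1.getD w 0 := by
        have := c1 w
        omega
      have hget : res.1.get? w = some (res.1.getD w 0) := by
        rw [PySem.Dict.getD_eq_get?_getD]
        cases hg : res.1.get? w with
        | none =>
          exfalso
          rw [PySem.Dict.getD_eq_get?_getD, hg] at hposv
          simp at hposv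
        | some v => simp
      refine ⟨(w, res.1.getD w 0), PySem.Dict.mem_items_of_get?_eq_some res.1 hget, ?_⟩
      simp [hposv, hpal]
  rw [hany, c6]
  by_cases h : OPb l = true
  · rw [h]; simp
  · rw [Bool.not_eq_true] at h; rw [h]; simp

-- ===== VERDICT (by name: the statement is the Claim_ definition above) =====
theorem longestPalindromeNaive_spec : Claim_equal_longestPalindromeNaive := by
  intro words _
  unfold Spec_longestPalindromeNaive
  rw [A_val, B_val]
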